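-- pv_equiv track=rewrite | github.com/neherlab/flu_clades | scripts/add_new_clades.py | full_clade_to_short_name
-- ===== SOURCE A (Python) =====
-- def full_clade_to_short_name(full_clade, aliases):
--     for full_parent in sorted(aliases.keys(), key=lambda x:len(x), reverse=True):
--         if tuple(full_clade[:len(full_parent)])==full_parent:
--             clade_name = aliases[full_parent]
--             if len(full_parent)<len(full_clade):
--                 clade_name += '.' + '.'.join([str(x) for x in full_clade[len(full_parent):]])
--             return clade_name
--
--     return '.'.join([str(x) for x in full_clade])
-- ===== SOURCE B (Python) =====
-- def full_clade_to_short_name(full_clade, aliases):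
--     longest = max(map(len, aliases), default=0)
--     for L in range(min(len(full_clade), longest), -1, -1):
--         name = aliases.get(tuple(full_clade[:L]))
--         if name is not None:
--             if L < len(full_clade):
--                 return name + '.' + '.'.join(str(x) for x in full_clade[L:])
--             return name
--     return '.'.join(str(x) for x in full_clade)
-- ===== Notes on version B (the rewrite author's own statement) =====
-- stated objective: alternative
-- what changed: A sorts all alias keys by length and scans them for the first prefix match; B never scans or sorts the key list: it walks the prefixes of full_clade itself from longest to shortest (capped at the longest key length), doing one dict lookup per prefix and returning on the first hit.
import Mathlib
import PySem

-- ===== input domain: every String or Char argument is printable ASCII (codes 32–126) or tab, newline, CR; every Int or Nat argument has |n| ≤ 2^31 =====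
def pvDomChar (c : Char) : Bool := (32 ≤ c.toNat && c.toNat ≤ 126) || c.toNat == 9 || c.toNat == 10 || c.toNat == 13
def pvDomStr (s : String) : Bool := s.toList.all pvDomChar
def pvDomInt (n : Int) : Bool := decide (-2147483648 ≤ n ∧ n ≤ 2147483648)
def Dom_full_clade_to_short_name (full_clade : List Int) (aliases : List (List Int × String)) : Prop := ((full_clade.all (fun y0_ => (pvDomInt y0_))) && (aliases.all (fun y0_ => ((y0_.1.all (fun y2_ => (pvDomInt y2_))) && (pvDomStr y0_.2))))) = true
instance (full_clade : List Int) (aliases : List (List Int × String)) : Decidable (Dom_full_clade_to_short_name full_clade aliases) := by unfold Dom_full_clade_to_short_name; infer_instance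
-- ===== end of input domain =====

-- B walks the prefixes of full_clade from longest to shortest with one dict lookup each,
-- never sorting or scanning the alias keys (objective: alternative algorithm).


-- ===== PORT A =====
-- the for-loop over the length-sorted key list; full_clade[:len(fp)] is `take fp.length`
-- (exact: the slice bound is a nonnegative Nat); aliases[fp] with fp drawn from the dict's
-- keys is `d.getD fp ""` (the key is present, so the default is never used).
def fullLoopA (full_clade : List Int) (d : PySem.Dict (List Int) String) : List (List Int) → String
  | [] => PySem.Str.join "." (full_clade.map PySem.Int.toStr)
  | fp :: rest =>
    if full_clade.take fp.length = fp then
      let clade_name := d.getD fp ""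
      if fp.length < full_clade.length then
        clade_name ++ "." ++ PySem.Str.join "." ((full_clade.drop fp.length).map PySem.Int.toStr)
      else clade_name
    else fullLoopA full_clade d rest

def full_clade_to_short_name (full_clade : List Int) (aliases : List (List Int × String)) : String :=
  let d := PySem.Dict.ofList aliases
  fullLoopA full_clade d (PySem.List.sorted d.keys (fun x => (x.length : Int)) true)

-- ===== PORT B =====
-- Source B's `for L in range(min(len(full_clade), longest), -1, -1)` with
-- `aliases.get(tuple(full_clade[:L]))` becomes a count-down recursion on L (a nonnegative
-- index, so Nat is exact); the post-loop fallback is the L = 0, lookup-missed case (the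
-- range is then exhausted); `max(map(len, aliases), default=0)` is a fold of max over the
-- key lengths in insertion order (exact).
def altLoop (fc : List Int) (d : PySem.Dict (List Int) String) (L : Nat) : String :=
  match d.get? (fc.take L) with
  | some name =>
    if L < fc.length then
      name ++ "." ++ PySem.Str.join "." ((fc.drop L).map PySem.Int.toStr)
    else name
  | none =>
    match L with
    | 0 => PySem.Str.join "." (fc.map PySem.Int.toStr)
    | L' + 1 => altLoop fc d L'
termination_by L

def full_clade_to_short_name_alt (full_clade : List Int) (aliases : List (List Int × String)) : String :=
  let d := PySem.Dict.ofList aliases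
  let longest := (d.keys.map List.length).foldl max 0
  altLoop full_clade d (min full_clade.length longest)

-- ===== PRECONDITION & SPEC =====
def Spec_full_clade_to_short_name (full_clade : List Int) (aliases : List (List Int × String)) (out : String) : Prop := out = full_clade_to_short_name_alt full_clade aliases
instance (full_clade : List Int) (aliases : List (List Int × String)) (out : String) : Decidable (Spec_full_clade_to_short_name full_clade aliases out) := by unfold Spec_full_clade_to_short_name; infer_instance

-- ===== CLAIM (what is proved, stated in full; the proofs are below) =====
def Claim_equal_full_clade_to_short_name : Prop := ∀ (full_clade : List Int) (aliases : List (List Int × String)), Dom_full_clade_to_short_name full_clade aliases → Spec_full_clade_to_short_name full_clade aliases (full_clade_to_short_name full_clade aliases)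

-- ===== LEMMAS AND PROOFS =====

-- the seed of a foldl max is at most its result
theorem init_le_foldl_max (l : List Nat) (b : Nat) : b ≤ l.foldl max b := by
  induction l generalizing b with
  | nil => simp
  | cons x xs ih => exact le_trans (le_max_left _ _) (ih _)

-- an element of a list is at most the running foldl max
theorem le_foldl_max (l : List Nat) (a b : Nat) (h : a ∈ l) : a ≤ l.foldl max b := by
  induction l generalizing b with
  | nil => exact absurd h (List.not_mem_nil)
  | cons x xs ih =>
    rcases List.mem_cons.mp h with rfl | hx
    · exact le_trans (le_max_right b a) (init_le_foldl_max xs _)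
    · exact ih _ hx

-- unfolding equations for altLoop
theorem altLoop_some (fc : List Int) (d : PySem.Dict (List Int) String) (L : Nat)
    (name : String) (h : d.get? (fc.take L) = some name) :
    altLoop fc d L =
      (if L < fc.length then
        name ++ "." ++ PySem.Str.join "." ((fc.drop L).map PySem.Int.toStr)
      else name) := by
  rw [altLoop.eq_def, h]

theorem altLoop_zero (fc : List Int) (d : PySem.Dict (List Int) String)
    (h : d.get? (fc.take 0) = none) :
    altLoop fc d 0 = PySem.Str.join "." (fc.map PySem.Int.toStr) := by
  rw [altLoop.eq_def, h]

theorem altLoop_succ (fc : List Int) (d : PySem.Dict (List Int) String) (L : Nat)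
    (h : d.get? (fc.take (L + 1)) = none) :
    altLoop fc d (L + 1) = altLoop fc d L := by
  rw [altLoop.eq_def, h]

-- If no prefix of length ≤ L is a key, the countdown falls through to joining the whole clade.
theorem altLoop_none (fc : List Int) (d : PySem.Dict (List Int) String) (L : Nat)
    (h : ∀ L', L' ≤ L → d.get? (fc.take L') = none) :
    altLoop fc d L = PySem.Str.join "." (fc.map PySem.Int.toStr) := by
  induction L with
  | zero => exact altLoop_zero fc d (h 0 le_rfl)
  | succ L ih =>
    rw [altLoop_succ fc d L (h (L + 1) le_rfl)]
    exact ih (fun L' hL' => h L' (Nat.le_succ_of_le hL'))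

-- If no prefix of length in (m, L] is a key, the countdown from L reaches the state at m.
theorem altLoop_skip (fc : List Int) (d : PySem.Dict (List Int) String) (L m : Nat)
    (hm : m ≤ L) (h : ∀ L', m < L' → L' ≤ L → d.get? (fc.take L') = none) :
    altLoop fc d L = altLoop fc d m := by
  induction L with
  | zero =>
    have : m = 0 := by omega
    rw [this]
  | succ L ih =>
    rcases Nat.eq_or_lt_of_le hm with heq | hlt
    · rw [heq]
    · rw [altLoop_succ fc d L (h (L + 1) hlt le_rfl)]
      exact ih (by omega) (fun L' h1 h2 => h L' h1 (Nat.le_succ_of_le h2))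

-- A's scan of any length-sorted list S of keys equals the countdown from L, provided S
-- consists of keys of d, all prefix-matches in S have length ≤ L, and S contains every
-- prefix of fc of length ≤ L that is a key of d.
theorem loopA_eq_altLoop (fc : List Int) (d : PySem.Dict (List Int) String)
    (S : List (List Int)) (L : Nat) (hL : L ≤ fc.length)
    (hs : ∀ k ∈ S, k ∈ d.keys)
    (hp : S.Pairwise (fun a b => b.length ≤ a.length))
    (hup : ∀ k ∈ S, fc.take k.length = k → k.length ≤ L)
    (hc : ∀ L', L' ≤ L → (d.get? (fc.take L')).isSome → fc.take L' ∈ S) :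
    fullLoopA fc d S = altLoop fc d L := by
  induction S generalizing L with
  | nil =>
    rw [fullLoopA, altLoop_none]
    intro L' hL'
    rcases h : d.get? (fc.take L') with _ | v
    · rfl
    · exact absurd (hc L' hL' (by simp [h])) (List.not_mem_nil)
  | cons k rest ih =>
    by_cases hm : fc.take k.length = k
    · -- head matches: its length is the largest matching prefix length
      have hkkey : k ∈ d.keys := hs k (List.mem_cons_self ..)
      have hksome : ∃ v, d.get? k = some v := by
        rcases h : d.get? k with _ | v
        · exact absurd ((PySem.Dict.get?_eq_none_iff_not_mem_keys d k).mp h) (not_not_intro hkkey)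
        · exact ⟨v, rfl⟩
      obtain ⟨v, hv⟩ := hksome
      have hgv : d.getD k "" = v := PySem.Dict.getD_of_get?_eq_some d "" hv
      have hskip : ∀ L', k.length < L' → L' ≤ L → d.get? (fc.take L') = none := by
        intro L' h1 h2
        rcases h : d.get? (fc.take L') with _ | w
        · rfl
        · exfalso
          have hmem := hc L' h2 (by simp [h])
          have hlen' : (fc.take L').length = L' := by
            simp; omega
          rcases List.mem_cons.mp hmem with heq | hrest
          · have := congrArg List.length heq
            rw [hlen'] at this; omega
          · have : (fc.take L').length ≤ k.length := by
              simpa [hlen'] using (List.pairwise_cons.mp hp).1 _ hrest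
            omega
      rw [altLoop_skip fc d L k.length (hup k (List.mem_cons_self ..) hm) hskip]
      rw [fullLoopA, if_pos hm, altLoop_some fc d k.length v (by rw [hm, hv]), hgv]
    · -- head does not match: A skips it, and it is no prefix of fc, so hc passes to the tail
      rw [fullLoopA, if_neg hm]
      refine ih L hL (fun k' h' => hs k' (List.mem_cons_of_mem _ h'))
        (List.pairwise_cons.mp hp).2
        (fun k' h' => hup k' (List.mem_cons_of_mem _ h'))
        (fun L' h1 h2 => ?_)
      have hmem := hc L' h1 h2
      rcases List.mem_cons.mp hmem with heq | hrest
      · exfalso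
        have hlen' : (fc.take L').length = L' := by simp; omega
        apply hm
        rw [← heq, hlen', heq]
      · exact hrest

-- ===== VERDICT (by name: the statement is the Claim_ definition above) =====
theorem full_clade_to_short_name_spec : Claim_equal_full_clade_to_short_name := by
  intro fc aliases _
  unfold Spec_full_clade_to_short_name full_clade_to_short_name full_clade_to_short_name_alt
  set d := PySem.Dict.ofList aliases with hd
  rw [loopA_eq_altLoop fc d _ (min fc.length ((d.keys.map List.length).foldl max 0))
        (min_le_left _ _)]
  · intro k hk
    exact (PySem.List.mem_sorted _ _ _ _).mp hk
  · have := PySem.List.sorted_pairwise_rev d.keys (fun x : List Int => (x.length : Int))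
    exact this.imp (fun h => by exact_mod_cast h)
  · intro k hk hm
    have hkey : k ∈ d.keys := (PySem.List.mem_sorted _ _ _ _).mp hk
    have h1 : k.length ≤ (d.keys.map List.length).foldl max 0 :=
      le_foldl_max _ _ _ (List.mem_map_of_mem hkey)
    have h2 := congrArg List.length hm
    simp at h2
    omega
  · intro L' _ hsome
    apply (PySem.List.mem_sorted _ _ _ _).mpr
    by_contra hnot
    rw [(PySem.Dict.get?_eq_none_iff_not_mem_keys d _).mpr hnot] at hsome
    simp at hsome
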